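-- pv_equiv track=rewrite | github.com/Mahesh-ch06/AIAC-LAB | Lab_Test01/Task2.py | is_magic_number
-- ===== SOURCE A (Python) =====
-- def is_magic_number(num):
--     if num == 0:
--         return True
--
--     sum_of_digits = 0
--     while num > 0:
--         digit = num % 10
--         sum_of_digits += digit
--         num //= 10
--
--     return sum_of_digits == 1
-- ===== SOURCE B (Python) =====
-- def is_magic_number(num):
--     if num == 0:
--         return True
--     while num % 10 == 0:
--         num //= 10
--     return num == 1
-- ===== Notes on version B (the rewrite author's own statement) =====
-- stated objective: alternative
-- what changed: Instead of accumulating the full digit sum and comparing it, B strips trailing zeros and checks that a single leading digit of one remains (num is a power of ten), stopping at the first nonzero digit.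
import Mathlib
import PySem

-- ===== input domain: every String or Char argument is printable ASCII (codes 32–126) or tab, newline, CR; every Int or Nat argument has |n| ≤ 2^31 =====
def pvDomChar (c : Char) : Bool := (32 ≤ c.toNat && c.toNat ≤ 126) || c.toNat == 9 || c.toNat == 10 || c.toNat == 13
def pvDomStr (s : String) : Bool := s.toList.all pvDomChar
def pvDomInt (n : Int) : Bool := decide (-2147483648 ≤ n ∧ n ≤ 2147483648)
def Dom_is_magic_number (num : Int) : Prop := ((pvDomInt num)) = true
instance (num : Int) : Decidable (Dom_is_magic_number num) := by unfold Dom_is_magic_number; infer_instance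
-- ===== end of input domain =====

-- B strips trailing zeros and tests the remaining value against 1 (digit sum 1 ⇔ power of ten) instead of summing every digit.

-- ===== PORT A =====
-- the 'while num > 0' digit-sum loop of A, accumulating sum_of_digits
def pvSumLoop (num : Int) (acc : Int) : Int :=
  if h : 0 < num then
    pvSumLoop (PySem.Int.floordiv num 10) (acc + PySem.Int.mod num 10)
  else acc
termination_by num.toNat
decreasing_by
  rw [PySem.Int.floordiv_eq_ediv_of_pos (by omega : (0:Int) < 10)]; omega

def is_magic_number (num : Int) : Bool :=
  if num = 0 then true
  else pvSumLoop num 0 == 1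

-- ===== PORT B =====
-- the 'while num % 10 == 0' loop of B; the 'num ≠ 0' conjunct is a totality
-- guard only (B's loop is reached only after the num == 0 early return)
def pvStripLoop (num : Int) : Int :=
  if h : num ≠ 0 ∧ PySem.Int.mod num 10 = 0 then
    pvStripLoop (PySem.Int.floordiv num 10)
  else num
termination_by num.natAbs
decreasing_by
  obtain ⟨h1, h2⟩ := h
  rw [PySem.Int.mod_eq_emod_of_pos (by omega : (0:Int) < 10)] at h2
  rw [PySem.Int.floordiv_eq_ediv_of_pos (by omega : (0:Int) < 10)]
  omega

def is_magic_number_alt (num : Int) : Bool :=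
  if num = 0 then true
  else pvStripLoop num == 1

-- ===== PRECONDITION & SPEC =====
def Spec_is_magic_number (num : Int) (out : Bool) : Prop := out = is_magic_number_alt num
instance (num : Int) (out : Bool) : Decidable (Spec_is_magic_number num out) := by unfold Spec_is_magic_number; infer_instance

-- ===== CLAIM (what is proved, stated in full; the proofs are below) =====
def Claim_equal_is_magic_number : Prop := ∀ (num : Int), Dom_is_magic_number num → Spec_is_magic_number num (is_magic_number num)

-- ===== LEMMAS AND PROOFS =====

lemma pvSumLoop_step {num : Int} (acc : Int) (h : 0 < num) :
    pvSumLoop num acc = pvSumLoop (PySem.Int.floordiv num 10) (acc + PySem.Int.mod num 10) := by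
  rw [pvSumLoop]; rw [dif_pos h]

lemma pvSumLoop_done {num : Int} (acc : Int) (h : ¬ 0 < num) : pvSumLoop num acc = acc := by
  rw [pvSumLoop]; rw [dif_neg h]

lemma pvStripLoop_step {num : Int} (h1 : num ≠ 0) (h2 : PySem.Int.mod num 10 = 0) :
    pvStripLoop num = pvStripLoop (PySem.Int.floordiv num 10) := by
  rw [pvStripLoop]; rw [dif_pos ⟨h1, h2⟩]

lemma pvStripLoop_done {num : Int} (h : ¬ (num ≠ 0 ∧ PySem.Int.mod num 10 = 0)) :
    pvStripLoop num = num := by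
  rw [pvStripLoop]; rw [dif_neg h]

lemma pvSumLoop_acc (num acc : Int) : pvSumLoop num acc = acc + pvSumLoop num 0 := by
  by_cases h : 0 < num
  · rw [pvSumLoop_step acc h, pvSumLoop_step 0 h,
        pvSumLoop_acc (PySem.Int.floordiv num 10) (acc + PySem.Int.mod num 10),
        pvSumLoop_acc (PySem.Int.floordiv num 10) (0 + PySem.Int.mod num 10)]
    ring
  · rw [pvSumLoop_done acc h, pvSumLoop_done 0 h]; ring
termination_by num.toNat
decreasing_by
  all_goals rw [PySem.Int.floordiv_eq_ediv_of_pos (by omega : (0:Int) < 10)]; omega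

lemma pvSumLoop_pos (num : Int) (hpos : 0 < num) : 1 ≤ pvSumLoop num 0 := by
  have hm := PySem.Int.mod_nonneg num (by omega : (0:Int) < 10)
  have hfd := PySem.Int.floordiv_mul_add_mod num 10
  rw [pvSumLoop_step 0 hpos, pvSumLoop_acc]
  by_cases hq : 0 < PySem.Int.floordiv num 10
  · have := pvSumLoop_pos (PySem.Int.floordiv num 10) hq
    omega
  · rw [pvSumLoop_done 0 hq]; omega
termination_by num.toNat
decreasing_by
  rw [PySem.Int.floordiv_eq_ediv_of_pos (by omega : (0:Int) < 10)]; omega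

lemma pvStripLoop_neg (num : Int) (h : num < 0) : pvStripLoop num < 0 := by
  have hm := PySem.Int.mod_nonneg num (by omega : (0:Int) < 10)
  have hfd := PySem.Int.floordiv_mul_add_mod num 10
  by_cases hc : num ≠ 0 ∧ PySem.Int.mod num 10 = 0
  · rw [pvStripLoop_step hc.1 hc.2]
    exact pvStripLoop_neg (PySem.Int.floordiv num 10) (by omega)
  · rw [pvStripLoop_done hc]; exact h
termination_by num.natAbs
decreasing_by
  omega

-- the key equivalence: for positive num, A's digit sum is 1 iff B's trailing-zero stripping leaves 1
lemma pv_key (num : Int) (hpos : 0 < num) :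
    (pvSumLoop num 0 = 1) ↔ (pvStripLoop num = 1) := by
  have hm := PySem.Int.mod_nonneg num (by omega : (0:Int) < 10)
  have hml := PySem.Int.mod_lt num (by omega : (0:Int) < 10)
  have hfd := PySem.Int.floordiv_mul_add_mod num 10
  by_cases hc : num ≠ 0 ∧ PySem.Int.mod num 10 = 0
  · have hq : 0 < PySem.Int.floordiv num 10 := by have h2 := hc.2; omega
    rw [pvStripLoop_step hc.1 hc.2, pvSumLoop_step 0 hpos, pvSumLoop_acc, hc.2]
    simpa using pv_key (PySem.Int.floordiv num 10) hq
  · rw [pvStripLoop_done hc]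
    have hmz : PySem.Int.mod num 10 ≠ 0 := fun h => hc ⟨by omega, h⟩
    rw [pvSumLoop_step 0 hpos, pvSumLoop_acc]
    by_cases hq : 0 < PySem.Int.floordiv num 10
    · have h1 := pvSumLoop_pos (PySem.Int.floordiv num 10) hq
      constructor <;> intro h <;> omega
    · rw [pvSumLoop_done 0 hq]
      constructor <;> intro h <;> omega
termination_by num.natAbs
decreasing_by
  omega

-- ===== VERDICT (by name: the statement is the Claim_ definition above) =====
theorem is_magic_number_spec : Claim_equal_is_magic_number := by
  intro num _
  unfold Spec_is_magic_number is_magic_number is_magic_number_alt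
  by_cases h0 : num = 0
  · simp [h0]
  · rw [if_neg h0, if_neg h0]
    rcases lt_trichotomy num 0 with hlt | heq | hgt
    · rw [pvSumLoop_done 0 (by omega)]
      have hB := pvStripLoop_neg num hlt
      have hne : pvStripLoop num ≠ 1 := by omega
      simp [hne]
    · exact absurd heq h0
    · have hk := pv_key num hgt
      by_cases h : pvSumLoop num 0 = 1
      · simp [h, hk.mp h]
      · have hne : pvStripLoop num ≠ 1 := fun hb => h (hk.mpr hb)
        simp [h, hne]
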